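-- pv_equiv track=rewrite | github.com/ALowtonQA/python-pre-learning-tasks-published | stretch-goals/vowel_swapper_stretch_goal.py | vowel_swapper
-- ===== SOURCE A (Python) =====
-- def vowel_swapper(string):
--     swaps = {"a": "4", "e": "3", "i": "!", "o": "ooo", "O": "000", "u": "|_|"}
--     str_list = list(string)
--
--     for key in swaps:
--         val = -1
--         for _ in range(0, 2):
--             val = string.lower().find(key, val + 1)
--         if val == -1:
--             continue
--         if str_list[val] == "o":
--             str_list[val] = swaps.get("o")
--         elif str_list[val] == "O":
--             str_list[val] = swaps.get("O")
--         else: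
--             str_list[val] = swaps.get(key, key)
--
--     return ''.join(str_list)
-- ===== SOURCE B (Python) =====
-- def vowel_swapper(string):
--     swaps = {"a": "4", "e": "3", "i": "!", "u": "|_|"}
--     str_list = list(string)
--     counts = {}
--     for i, c in enumerate(string.lower()):
--         if c in "aeiou":
--             n = counts.get(c, 0) + 1
--             counts[c] = n
--             if n == 2:
--                 if c == "o":
--                     str_list[i] = "ooo" if str_list[i] == "o" else "000"
--                 else:
--                     str_list[i] = swaps[c]
--     return ''.join(str_list)
-- ===== Notes on version B (the rewrite author's own statement) =====
-- stated objective: alternative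
-- what changed: replaces A's six repeated string.lower().find scans (two per dict key) and in-place branch logic by a single pass over the lowered string with a per-vowel occurrence counter, rewriting a position exactly when its vowel's count reaches 2
import Mathlib
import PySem

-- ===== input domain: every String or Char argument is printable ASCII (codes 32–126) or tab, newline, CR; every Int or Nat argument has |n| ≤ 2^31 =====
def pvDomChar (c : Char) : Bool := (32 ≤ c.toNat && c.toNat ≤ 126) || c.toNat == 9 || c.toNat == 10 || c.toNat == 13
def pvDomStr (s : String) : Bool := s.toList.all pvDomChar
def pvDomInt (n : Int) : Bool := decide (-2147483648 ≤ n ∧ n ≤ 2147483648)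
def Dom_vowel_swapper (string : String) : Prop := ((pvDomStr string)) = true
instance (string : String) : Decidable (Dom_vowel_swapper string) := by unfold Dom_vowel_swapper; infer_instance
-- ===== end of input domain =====

-- B replaces A's six repeated lower().find scans by one pass over the lowered string
-- with a per-vowel occurrence counter (objective: alternative single-traversal algorithm).

-- ===== PORT A =====
-- Literal port of A.  `str_list[val]` / `str_list[val] = …` use pyGetD/pySetD: `val` is a
-- non-negative find result into a string of the same length, so IndexError is impossible there;
-- `swaps.get("o")` / `swaps.get("O")` are ports of lookups whose key is literally present.
def vowel_swapper (string : String) : String :=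
  let swaps : PySem.Dict String String :=
    PySem.Dict.ofList [("a","4"),("e","3"),("i","!"),("o","ooo"),("O","000"),("u","|_|")]
  let str_list : List String := string.toList.map (fun c => String.ofList [c])
  let final : List String :=
    (PySem.Dict.keys swaps).foldl (fun sl key =>
      let val : Int :=
        (PySem.List.pyRange 0 2 1).foldl
          (fun val _ => PySem.Str.findFrom (PySem.Str.lower string) key (val + 1)) (-1)
      if val == -1 then sl
      else if PySem.List.pyGetD sl val "" == "o" then
        PySem.List.pySetD sl val (PySem.Dict.getD swaps "o" "")
      else if PySem.List.pyGetD sl val "" == "O" then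
        PySem.List.pySetD sl val (PySem.Dict.getD swaps "O" "")
      else
        PySem.List.pySetD sl val (PySem.Dict.getD swaps key key)) str_list
  PySem.Str.join "" final

-- ===== PORT B =====
-- Literal port of B (one pass, counter dict).  `swaps[c]` is a lookup whose key is literally
-- present (c is a vowel other than "o" there), ported as getD.
def vowel_swapper_alt (string : String) : String :=
  let swaps : PySem.Dict String String :=
    PySem.Dict.ofList [("a","4"),("e","3"),("i","!"),("u","|_|")]
  let str_list : List String := string.toList.map (fun c => String.ofList [c])
  let st :=
    (PySem.List.enumerate (PySem.Str.lower string).toList).foldl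
      (fun (st : List String × PySem.Dict String Int) ic =>
        let c : String := String.ofList [ic.2]
        if PySem.Str.isIn c "aeiou" then
          let n : Int := PySem.Dict.getD st.2 c 0 + 1
          let counts := PySem.Dict.insert st.2 c n
          if n == 2 then
            if c == "o" then
              (PySem.List.pySetD st.1 ic.1
                (if PySem.List.pyGetD st.1 ic.1 "" == "o" then "ooo" else "000"), counts)
            else
              (PySem.List.pySetD st.1 ic.1 (PySem.Dict.getD swaps c ""), counts)
          else (st.1, counts)
        else st)
      (str_list, PySem.Dict.empty)
  PySem.Str.join "" st.1

-- ===== PRECONDITION & SPEC =====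
def Spec_vowel_swapper (string : String) (out : String) : Prop := out = vowel_swapper_alt string
instance (string : String) (out : String) : Decidable (Spec_vowel_swapper string out) := by unfold Spec_vowel_swapper; infer_instance

-- ===== CLAIM (what is proved, stated in full; the proofs are below) =====
def Claim_equal_vowel_swapper : Prop := ∀ (string : String), Dom_vowel_swapper string → Spec_vowel_swapper string (vowel_swapper string)

-- ===== LEMMAS AND PROOFS =====

def pvVowels : List Char := ['a', 'e', 'i', 'o', 'u']

def pvLow (s : List Char) : List Char := PySem.Chars.lower s

def pvSym (oc lc : Char) : String :=
  if lc = 'o' then (if oc = 'o' then "ooo" else "000")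
  else if lc = 'a' then "4" else if lc = 'e' then "3" else if lc = 'i' then "!" else "|_|"

-- j is the SECOND occurrence of k in l: l[j] = k and exactly one k strictly before j
def pvP (l : List Char) (k : Char) (j : Nat) : Prop :=
  l[j]? = some k ∧ (l.take j).count k = 1

def pvHit (s : List Char) (K : List Char) (i : Nat) : Bool :=
  match (pvLow s)[i]? with
  | some c => K.contains c && (((pvLow s).take i).count c == 1)
  | none => false

def pvCell (s : List Char) (K : List Char) (i : Nat) : String :=
  if pvHit s K i then pvSym (s.getD i ' ') ((pvLow s).getD i ' ')
  else String.ofList [s.getD i ' ']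

def pvApply (s : List Char) (K : List Char) : List String :=
  (List.range s.length).map (pvCell s K)

def pvCellUp (s : List Char) (m : Nat) (i : Nat) : String :=
  if decide (i < m) && pvHit s pvVowels i then pvSym (s.getD i ' ') ((pvLow s).getD i ' ')
  else String.ofList [s.getD i ' ']

def pvUpTo (s : List Char) (m : Nat) : List String :=
  (List.range s.length).map (pvCellUp s m)

-- the value A's two-find loop leaves in `val`
def pvValA (l key : List Char) : Int :=
  PySem.Chars.findFrom l key (PySem.Chars.find l key + 1)

-- A's loop body, named
def pvStepA (string : String) (sl : List String) (key : String) : List String :=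
  if ((PySem.List.pyRange 0 2 1).foldl
      (fun val _ => PySem.Str.findFrom (PySem.Str.lower string) key (val + 1)) (-1 : Int)) == -1 then sl
  else if PySem.List.pyGetD sl ((PySem.List.pyRange 0 2 1).foldl
      (fun val _ => PySem.Str.findFrom (PySem.Str.lower string) key (val + 1)) (-1 : Int)) "" == "o" then
    PySem.List.pySetD sl ((PySem.List.pyRange 0 2 1).foldl
      (fun val _ => PySem.Str.findFrom (PySem.Str.lower string) key (val + 1)) (-1 : Int))
      (PySem.Dict.getD (PySem.Dict.ofList [("a","4"),("e","3"),("i","!"),("o","ooo"),("O","000"),("u","|_|")]) "o" "")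
  else if PySem.List.pyGetD sl ((PySem.List.pyRange 0 2 1).foldl
      (fun val _ => PySem.Str.findFrom (PySem.Str.lower string) key (val + 1)) (-1 : Int)) "" == "O" then
    PySem.List.pySetD sl ((PySem.List.pyRange 0 2 1).foldl
      (fun val _ => PySem.Str.findFrom (PySem.Str.lower string) key (val + 1)) (-1 : Int))
      (PySem.Dict.getD (PySem.Dict.ofList [("a","4"),("e","3"),("i","!"),("o","ooo"),("O","000"),("u","|_|")]) "O" "")
  else
    PySem.List.pySetD sl ((PySem.List.pyRange 0 2 1).foldl
      (fun val _ => PySem.Str.findFrom (PySem.Str.lower string) key (val + 1)) (-1 : Int))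
      (PySem.Dict.getD (PySem.Dict.ofList [("a","4"),("e","3"),("i","!"),("o","ooo"),("O","000"),("u","|_|")]) key key)

-- B's loop body, named
def pvStepB (st : List String × PySem.Dict String Int) (ic : Int × Char) :
    List String × PySem.Dict String Int :=
  if PySem.Str.isIn (String.ofList [ic.2]) "aeiou" then
    if (PySem.Dict.getD st.2 (String.ofList [ic.2]) 0 + 1 == 2) then
      if (String.ofList [ic.2] == "o") then
        (PySem.List.pySetD st.1 ic.1
          (if PySem.List.pyGetD st.1 ic.1 "" == "o" then "ooo" else "000"),
         PySem.Dict.insert st.2 (String.ofList [ic.2])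
           (PySem.Dict.getD st.2 (String.ofList [ic.2]) 0 + 1))
      else
        (PySem.List.pySetD st.1 ic.1 (PySem.Dict.getD (PySem.Dict.ofList [("a","4"),("e","3"),("i","!"),("u","|_|")]) (String.ofList [ic.2]) ""),
         PySem.Dict.insert st.2 (String.ofList [ic.2])
           (PySem.Dict.getD st.2 (String.ofList [ic.2]) 0 + 1))
    else
      (st.1,
       PySem.Dict.insert st.2 (String.ofList [ic.2])
         (PySem.Dict.getD st.2 (String.ofList [ic.2]) 0 + 1))
  else st

-- ---------- generic small lemmas ----------

theorem pv_toNat_inj {c d : Char} (h : c.toNat = d.toNat) : c = d := by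
  have h2 := congrArg Char.ofNat h
  rwa [Char.ofNat_toNat, Char.ofNat_toNat] at h2

theorem pv_ofList_inj {c d : Char} (h : String.ofList [c] = String.ofList [d]) : c = d := by
  have h2 := congrArg String.toList h
  simpa using h2

theorem pvLow_eq_map (s : List Char) : pvLow s = s.map PySem.Chars.lowerChar := rfl

theorem pvLow_length (s : List Char) : (pvLow s).length = s.length := by
  rw [pvLow_eq_map]; exact List.length_map ..

theorem pv_lower_char {s : List Char} {i : Nat} (h : i < s.length) :
    (pvLow s)[i]? = some (PySem.Chars.lowerChar (s.getD i ' ')) := by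
  rw [pvLow_eq_map, List.getElem?_map]
  rw [List.getElem?_eq_getElem h, List.getD_eq_getElem _ _ h]
  rfl

theorem pv_isupper_iff (c : Char) :
    PySem.Chars.isupper c = true ↔ 65 ≤ c.toNat ∧ c.toNat ≤ 90 := by
  simp only [PySem.Chars.isupper, Bool.and_eq_true, decide_eq_true_eq]
  constructor
  · rintro ⟨h1, h2⟩
    exact ⟨h1, h2⟩
  · rintro ⟨h1, h2⟩
    exact ⟨h1, h2⟩

theorem pv_lowerChar_o (c : Char) :
    PySem.Chars.lowerChar c = 'o' ↔ (c = 'o' ∨ c = 'O') := by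
  unfold PySem.Chars.lowerChar
  by_cases h : PySem.Chars.isupper c = true
  · rw [if_pos h]
    have hb := (pv_isupper_iff c).1 h
    constructor
    · intro he
      right
      have ht := congrArg Char.toNat he
      rw [Char.toNat_ofNat] at ht
      rw [if_pos (Or.inl (by omega))] at ht
      have : c.toNat = (79 : Nat) := by
        have : ('o').toNat = 111 := by decide
        omega
      exact pv_toNat_inj (by rw [this]; decide)
    · rintro (rfl | rfl)
      · exact absurd hb (by decide)
      · decide
  · rw [if_neg h]
    constructor
    · intro he; exact Or.inl he
    · rintro (rfl | rfl)
      · rfl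
      · exact absurd (by decide : PySem.Chars.isupper 'O' = true) h

theorem pv_lowerChar_ne_O (c : Char) : PySem.Chars.lowerChar c ≠ 'O' := by
  unfold PySem.Chars.lowerChar
  by_cases h : PySem.Chars.isupper c = true
  · rw [if_pos h]
    have hb := (pv_isupper_iff c).1 h
    intro he
    have ht := congrArg Char.toNat he
    rw [Char.toNat_ofNat] at ht
    rw [if_pos (Or.inl (by omega))] at ht
    have : ('O').toNat = 79 := by decide
    omega
  · rw [if_neg h]
    rintro rfl
    exact h (by decide)

theorem pv_singleton_prefix (l : List Char) (k : Char) (i : Nat) :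
    [k] <+: l.drop i ↔ l[i]? = some k := by
  have h0 : l[i]? = (l.drop i)[0]? := by
    rw [List.getElem?_drop]
    norm_num
  cases hd : l.drop i with
  | nil =>
      rw [hd] at h0
      simp [h0]
  | cons x xs =>
      rw [hd] at h0
      simp only [List.getElem?_cons_zero] at h0
      rw [h0, List.cons_prefix_cons]
      simp [eq_comm]

theorem pv_singleton_infix (k : Char) (l : List Char) : [k] <:+: l ↔ k ∈ l := by
  induction l with
  | nil => simp
  | cons x xs ih =>
      rw [List.infix_cons_iff, List.cons_prefix_cons]
      simp [ih]

theorem pv_count_take_zero {l : List Char} {k : Char} {m : Nat}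
    (h : ∀ i, i < m → l[i]? ≠ some k) : (l.take m).count k = 0 := by
  rw [List.count_eq_zero]
  intro hmem
  rcases List.mem_iff_getElem.1 hmem with ⟨i, hlt, hEq⟩
  have hi1 : i < m := by
    have := hlt
    simp only [List.length_take] at this
    omega
  have hi2 : i < l.length := by
    have := hlt
    simp only [List.length_take] at this
    omega
  apply h i hi1
  rw [List.getElem?_eq_getElem hi2]
  rw [List.getElem_take] at hEq
  rw [hEq]

theorem pv_count_take_succ {l : List Char} {j : Nat} (h : j < l.length) (k : Char) :
    (l.take (j+1)).count k = (l.take j).count k + (if l[j] = k then 1 else 0) := by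
  rw [List.take_succ_eq_append_getElem h, List.count_append]
  by_cases hk : l[j] = k
  · simp [hk]
  · simp [hk]

theorem pv_second_unique_lt {l : List Char} {k : Char} {i j : Nat}
    (hi : pvP l k i) (hj : pvP l k j) (hij : i < j) : False := by
  obtain ⟨hgi, hci⟩ := hi
  obtain ⟨hgj, hcj⟩ := hj
  have hi_lt : i < l.length := by
    have := List.getElem?_eq_some_iff.1 hgi
    exact this.1
  have hgi' : l[i] = k := (List.getElem?_eq_some_iff.1 hgi).2
  have htake : (l.take (i+1)).count k = 2 := by
    rw [pv_count_take_succ hi_lt, if_pos hgi', hci]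
  have hsub : (l.take (i+1)).Sublist (l.take j) := by
    have heq : l.take (i+1) = (l.take j).take (i+1) := by
      rw [List.take_take]
      congr 1
      omega
    rw [heq]
    exact (List.take_prefix _ _).sublist
  have hle := hsub.count_le k
  rw [htake, hcj] at hle
  omega

theorem pv_second_unique {l : List Char} {k : Char} {i j : Nat}
    (hi : pvP l k i) (hj : pvP l k j) : i = j := by
  rcases Nat.lt_trichotomy i j with h | h | h
  · exact absurd (pv_second_unique_lt hi hj h) (fun x => x)
  · exact h
  · exact absurd (pv_second_unique_lt hj hi h) (fun x => x)

-- ---------- A's double find characterisation ----------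

theorem pvValA_spec (l : List Char) (k : Char) :
    (pvValA l [k] = -1 ∧ ∀ j, ¬ pvP l k j) ∨
    (∃ j : Nat, pvValA l [k] = (j : Int) ∧ pvP l k j) := by
  unfold pvValA
  by_cases hF : PySem.Chars.find l [k] = -1
  · left
    have hnotin : k ∉ l := by
      intro hmem
      have := (PySem.Chars.find_eq_neg_one_iff l [k]).1 hF
      exact this ((pv_singleton_infix k l).2 hmem)
    constructor
    · rw [hF]
      rw [show (-1 : Int) + 1 = 0 from by norm_num, PySem.Chars.findFrom_zero]
      exact hF
    · rintro j ⟨hgj, _⟩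
      exact hnotin (List.mem_of_getElem? hgj)
  · have hF0 : 0 ≤ PySem.Chars.find l [k] := by
      have := PySem.Chars.neg_one_le_find l [k]
      omega
    set F := PySem.Chars.find l [k] with hFdef
    obtain ⟨hpre, hmin⟩ := PySem.Chars.find_spec (s := l) (sub := [k]) hF0
    set m := F.toNat with hmdef
    have hFm : F = (m : Int) := by omega
    have hgm : l[m]? = some k := (pv_singleton_prefix l k m).1 hpre
    have hm_lt : m < l.length := (List.getElem?_eq_some_iff.1 hgm).1
    have hgm' : l[m] = k := (List.getElem?_eq_some_iff.1 hgm).2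
    have hcm : (l.take m).count k = 0 := by
      apply pv_count_take_zero
      intro i hi hEq
      exact hmin i hi ((pv_singleton_prefix l k i).2 hEq)
    have hcast : F + 1 = ((m + 1 : Nat) : Int) := by omega
    have hm1_le : m + 1 ≤ l.length := hm_lt
    by_cases h2 : PySem.Chars.findFrom l [k] (F + 1) = -1
    · left
      refine ⟨h2, ?_⟩
      have hnotin : k ∉ l.drop (m+1) := by
        intro hmem
        rw [hcast] at h2
        have := (PySem.Chars.findFrom_natCast_eq_neg_one_iff l [k] (m+1) hm1_le).1 h2
        exact this ((pv_singleton_infix k _).2 hmem)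
      rintro j ⟨hgj, hcj⟩
      have hj_lt : j < l.length := (List.getElem?_eq_some_iff.1 hgj).1
      rcases Nat.lt_trichotomy j m with hj | hj | hj
      · exact hmin j hj ((pv_singleton_prefix l k j).2 hgj)
      · subst hj; rw [hcm] at hcj; omega
      · apply hnotin
        have : (l.drop (m+1))[j - (m+1)]? = some k := by
          rw [List.getElem?_drop]
          rw [show m + 1 + (j - (m+1)) = j by omega]
          exact hgj
        exact List.mem_of_getElem? this
    · right
      rw [hcast] at h2 ⊢
      obtain ⟨hle, hpre2, hmin2⟩ :=
        PySem.Chars.findFrom_natCast_spec l [k] (m+1) hm1_le h2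
      set v := PySem.Chars.findFrom l [k] ((m+1 : Nat) : Int) with hvdef
      have hv0 : 0 ≤ v := by omega
      set j := v.toNat with hjdef
      have hvj : v = (j : Int) := by omega
      have hmj : m + 1 ≤ j := by omega
      refine ⟨j, hvj, ?_, ?_⟩
      · exact (pv_singleton_prefix l k j).1 hpre2
      · have hj_lt : j < l.length :=
          (List.getElem?_eq_some_iff.1 ((pv_singleton_prefix l k j).1 hpre2)).1
        have hsplit : l.take j = l.take (m+1) ++ (l.take j).drop (m+1) := by
          conv_lhs => rw [← List.take_append_drop (m+1) (l.take j)]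
          rw [List.take_take]
          congr 2
          omega
        rw [hsplit, List.count_append]
        have hc1 : (l.take (m+1)).count k = 1 := by
          rw [pv_count_take_succ hm_lt, if_pos hgm', hcm]
        have hc2 : ((l.take j).drop (m+1)).count k = 0 := by
          rw [List.drop_take]
          apply pv_count_take_zero
          intro i hi hEq
          have hidx : m + 1 + i < j := by omega
          apply hmin2 (m + 1 + i) (by omega) hidx
          apply (pv_singleton_prefix l k (m+1+i)).2
          rw [List.getElem?_drop] at hEq
          exact hEq
        rw [hc1, hc2]

-- ---------- pvApply / pvUpTo facts ----------

theorem pvApply_length (s K) : (pvApply s K).length = s.length := by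
  simp [pvApply]

theorem pvUpTo_length (s m) : (pvUpTo s m).length = s.length := by
  simp [pvUpTo]

theorem pv_map_range_congr {n : Nat} {f g : Nat → String}
    (h : ∀ i, i < n → f i = g i) : (List.range n).map f = (List.range n).map g := by
  apply List.map_congr_left
  intro a ha
  exact h a (List.mem_range.1 ha)

theorem pvApply_nil (s : List Char) :
    s.map (fun c => String.ofList [c]) = pvApply s [] := by
  apply List.ext_getElem
  · simp [pvApply]
  · intro i h1 h2
    simp only [List.getElem_map, pvApply, List.getElem_range, pvCell]
    have : pvHit s [] i = false := by
      unfold pvHit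
      cases (pvLow s)[i]? <;> simp
    rw [this]
    simp only [Bool.false_eq_true, if_false]
    have hi : i < s.length := by simpa using h1
    rw [List.getD_eq_getElem _ _ hi]

theorem pv_init_upto (s : List Char) :
    s.map (fun c => String.ofList [c]) = pvUpTo s 0 := by
  apply List.ext_getElem
  · simp [pvUpTo]
  · intro i h1 h2
    simp only [List.getElem_map, pvUpTo, List.getElem_range, pvCellUp]
    simp only [Nat.not_lt_zero, decide_false, Bool.false_and, Bool.false_eq_true, if_false]
    have hi : i < s.length := by simpa using h1
    rw [List.getD_eq_getElem _ _ hi]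

theorem pvUpTo_full (s : List Char) : pvUpTo s s.length = pvApply s pvVowels := by
  unfold pvUpTo pvApply
  apply pv_map_range_congr
  intro i hi
  unfold pvCellUp pvCell
  rw [decide_eq_true hi]
  simp

-- hit is stable when the set of keys grows by a key with no second occurrence,
-- or characterised at the unique second occurrence
theorem pvHit_true_iff (s : List Char) (K : List Char) (i : Nat) :
    pvHit s K i = true ↔ ∃ c, (pvLow s)[i]? = some c ∧ c ∈ K ∧ pvP (pvLow s) c i := by
  unfold pvHit
  cases hg : (pvLow s)[i]? with
  | none => simp [pvP, hg]
  | some c =>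
      simp only [Bool.and_eq_true, List.contains_iff_mem, beq_iff_eq]
      constructor
      · rintro ⟨h1, h2⟩
        exact ⟨c, rfl, h1, hg, h2⟩
      · rintro ⟨c', hc', h1, _, h2⟩
        obtain rfl : c = c' := by simpa using hc'
        exact ⟨h1, h2⟩

theorem pvApply_congr_no_second (s : List Char) (K : List Char) (k : Char)
    (hnone : ∀ j, ¬ pvP (pvLow s) k j) :
    pvApply s K = pvApply s (K ++ [k]) := by
  unfold pvApply
  apply pv_map_range_congr
  intro i _
  unfold pvCell
  have : pvHit s K i = pvHit s (K ++ [k]) i := by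
    by_cases h1 : pvHit s (K ++ [k]) i = true
    · rcases (pvHit_true_iff s (K ++ [k]) i).1 h1 with ⟨c, hg, hmem, hP⟩
      rcases List.mem_append.1 hmem with hm | hm
      · rw [h1]
        exact (pvHit_true_iff s K i).2 ⟨c, hg, hm, hP⟩
      · exfalso
        have : c = k := by simpa using hm
        subst this
        exact hnone i hP
    · by_cases h2 : pvHit s K i = true
      · rcases (pvHit_true_iff s K i).1 h2 with ⟨c, hg, hmem, hP⟩
        exact absurd ((pvHit_true_iff s (K ++ [k]) i).2
          ⟨c, hg, List.mem_append.2 (Or.inl hmem), hP⟩) h1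
      · simp only [Bool.not_eq_true] at h1 h2
        rw [h1, h2]
  rw [this]

theorem pvApply_set (s : List Char) (K : List Char) (k : Char) (j : Nat)
    (hkK : k ∉ K) (hPj : pvP (pvLow s) k j) :
    (pvApply s K).set j (pvSym (s.getD j ' ') k) = pvApply s (K ++ [k]) := by
  have hj_lt : j < (pvLow s).length := (List.getElem?_eq_some_iff.1 hPj.1).1
  have hj_lt' : j < s.length := by rw [pvLow_length] at hj_lt; exact hj_lt
  apply List.ext_getElem
  · simp [pvApply]
  · intro i h1 h2
    have hi : i < s.length := by
      simpa [pvApply] using h2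
    rw [List.getElem_set]
    simp only [pvApply, List.getElem_map, List.getElem_range]
    by_cases hij : j = i
    · subst hij
      rw [if_pos rfl]
      unfold pvCell
      have hhit : pvHit s (K ++ [k]) j = true := by
        apply (pvHit_true_iff s (K ++ [k]) j).2
        exact ⟨k, hPj.1, List.mem_append.2 (Or.inr (by simp)), hPj⟩
      rw [hhit]
      simp only [if_true]
      have hgd : (pvLow s).getD j ' ' = k := by
        rw [List.getD_eq_getElem _ _ hj_lt]
        exact (List.getElem?_eq_some_iff.1 hPj.1).2
      rw [hgd]
    · rw [if_neg hij]
      unfold pvCell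
      have : pvHit s K i = pvHit s (K ++ [k]) i := by
        by_cases h1 : pvHit s (K ++ [k]) i = true
        · rcases (pvHit_true_iff s (K ++ [k]) i).1 h1 with ⟨c, hg, hmem, hP⟩
          rcases List.mem_append.1 hmem with hm | hm
          · rw [h1]
            exact (pvHit_true_iff s K i).2 ⟨c, hg, hm, hP⟩
          · exfalso
            have : c = k := by simpa using hm
            subst this
            exact hij (pv_second_unique hPj hP)
        · by_cases h2 : pvHit s K i = true
          · rcases (pvHit_true_iff s K i).1 h2 with ⟨c, hg, hmem, hP⟩
            exact absurd ((pvHit_true_iff s (K ++ [k]) i).2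
              ⟨c, hg, List.mem_append.2 (Or.inl hmem), hP⟩) h1
          · simp only [Bool.not_eq_true] at h1 h2
            rw [h1, h2]
      rw [this]

-- value of pvApply at an index whose key is not yet in K
theorem pvApply_getD_orig (s : List Char) (K : List Char) (k : Char) (j : Nat)
    (hkK : k ∉ K) (hPj : pvP (pvLow s) k j) :
    PySem.List.pyGetD (pvApply s K) (j : Int) "" = String.ofList [s.getD j ' '] := by
  have hj_lt : j < (pvLow s).length := (List.getElem?_eq_some_iff.1 hPj.1).1
  have hj_lt' : j < s.length := by rw [pvLow_length] at hj_lt; exact hj_lt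
  rw [PySem.List.pyGetD_natCast]
  have hlen : j < (pvApply s K).length := by rw [pvApply_length]; exact hj_lt'
  rw [List.getD_eq_getElem _ _ hlen]
  simp only [pvApply, List.getElem_map, List.getElem_range]
  unfold pvCell
  have hhit : pvHit s K j = false := by
    by_contra h
    simp only [Bool.not_eq_false] at h
    rcases (pvHit_true_iff s K j).1 h with ⟨c, hg, hmem, hP⟩
    have : c = k := by
      rw [hPj.1] at hg
      exact (Option.some_inj.1 hg).symm
    subst this
    exact hkK hmem
  rw [hhit]
  simp

-- ---------- A port: fold assembly ----------

theorem pvA_unfold (string : String) :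
    vowel_swapper string =
      PySem.Str.join "" (List.foldl (pvStepA string)
        (string.toList.map (fun c => String.ofList [c])) ["a","e","i","o","O","u"]) := rfl

theorem pv_pyRange_0_2 : PySem.List.pyRange 0 2 1 = [0, 1] := by decide

theorem pvStepA_val (string : String) (key : String) :
    ((PySem.List.pyRange 0 2 1).foldl
      (fun val _ => PySem.Str.findFrom (PySem.Str.lower string) key (val + 1)) (-1 : Int)) =
    pvValA (pvLow string.toList) key.toList := by
  rw [pv_pyRange_0_2]
  simp only [List.foldl_cons, List.foldl_nil]
  rw [show (-1 : Int) + 1 = 0 by norm_num]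
  rw [PySem.Str.findFrom_eq, PySem.Str.toList_lower, PySem.Str.findFrom_eq,
    PySem.Str.toList_lower]
  rw [PySem.Chars.findFrom_zero]
  rfl

theorem pvStepA_O (string : String) (sl : List String) :
    pvStepA string sl "O" = sl := by
  unfold pvStepA
  rw [pvStepA_val]
  have hO : ("O" : String).toList = ['O'] := by decide
  rw [hO]
  have hnotin : 'O' ∉ pvLow string.toList := by
    rw [pvLow_eq_map]
    intro hmem
    rcases List.mem_map.1 hmem with ⟨c, _, hc⟩
    exact pv_lowerChar_ne_O c hc
  have hfind : PySem.Chars.find (pvLow string.toList) ['O'] = -1 := by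
    rw [PySem.Chars.find_eq_neg_one_iff]
    intro hinf
    exact hnotin ((pv_singleton_infix _ _).1 hinf)
  have hval : pvValA (pvLow string.toList) ['O'] = -1 := by
    unfold pvValA
    rw [hfind]
    rw [show (-1 : Int) + 1 = 0 by norm_num, PySem.Chars.findFrom_zero]
    exact hfind
  rw [hval]
  rfl

theorem pvStepA_vowel (string : String) (K : List Char) (k : Char)
    (hk : k ∈ pvVowels) (hkK : k ∉ K) :
    pvStepA string (pvApply string.toList K) (String.ofList [k]) =
      pvApply string.toList (K ++ [k]) := by
  unfold pvStepA
  rw [pvStepA_val, String.toList_ofList]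
  set s := string.toList with hs
  set l := pvLow s with hl
  rcases pvValA_spec l k with ⟨hv, hnone⟩ | ⟨j, hv, hPj⟩
  · rw [hv]
    simp only [BEq.rfl, if_true]
    exact pvApply_congr_no_second s K k hnone
  · rw [hv]
    have hne : (((j : Nat) : Int) == -1) = false := by
      simp only [beq_eq_false_iff_ne, ne_eq]
      omega
    rw [hne]
    simp only [Bool.false_eq_true, if_false]
    rw [pvApply_getD_orig s K k j hkK hPj]
    have hj_lt : j < l.length := (List.getElem?_eq_some_iff.1 hPj.1).1
    have hj_lt' : j < s.length := by rw [hl, pvLow_length] at hj_lt; exact hj_lt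
    have hlow : PySem.Chars.lowerChar (s.getD j ' ') = k := by
      have := pv_lower_char (s := s) hj_lt'
      rw [← hl, hPj.1] at this
      exact (Option.some_inj.1 this).symm
    have hset : ∀ v, PySem.List.pySetD (pvApply s K) ((j : Nat) : Int) v =
        (pvApply s K).set j v := by
      intro v
      rw [PySem.List.pySetD_natCast]
    by_cases ho : s.getD j ' ' = 'o'
    · have hko : k = 'o' := by
        rw [ho] at hlow
        have : PySem.Chars.lowerChar 'o' = 'o' := by decide
        rw [this] at hlow
        exact hlow.symm
      have : (String.ofList [s.getD j ' '] == "o") = true := by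
        rw [ho]; decide
      rw [this]
      simp only [if_true]
      rw [hset]
      have hval : PySem.Dict.getD
          (PySem.Dict.ofList [("a","4"),("e","3"),("i","!"),("o","ooo"),("O","000"),("u","|_|")])
          "o" "" = "ooo" := by decide
      rw [hval]
      have hsym : pvSym (s.getD j ' ') k = "ooo" := by
        rw [hko, ho]; rfl
      rw [← hsym]
      exact pvApply_set s K k j hkK hPj
    · by_cases hO : s.getD j ' ' = 'O'
      · have hko : k = 'o' := by
          rw [hO] at hlow
          have : PySem.Chars.lowerChar 'O' = 'o' := by decide
          rw [this] at hlow
          exact hlow.symm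
        have h1 : (String.ofList [s.getD j ' '] == "o") = false := by
          rw [hO]; decide
        have h2 : (String.ofList [s.getD j ' '] == "O") = true := by
          rw [hO]; decide
        rw [h1]
        simp only [Bool.false_eq_true, if_false]
        rw [h2]
        simp only [if_true]
        rw [hset]
        have hval : PySem.Dict.getD
            (PySem.Dict.ofList [("a","4"),("e","3"),("i","!"),("o","ooo"),("O","000"),("u","|_|")])
            "O" "" = "000" := by decide
        rw [hval]
        have hsym : pvSym (s.getD j ' ') k = "000" := by
          rw [hko, hO]
          rfl
        rw [← hsym]
        exact pvApply_set s K k j hkK hPj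
      · have hko : k ≠ 'o' := by
          intro hkk
          subst hkk
          rcases (pv_lowerChar_o (s.getD j ' ')).1 hlow with h | h
          · exact ho h
          · exact hO h
        have h1 : (String.ofList [s.getD j ' '] == "o") = false := by
          simp only [beq_eq_false_iff_ne, ne_eq]
          intro hh
          exact ho (pv_ofList_inj (hh.trans (by decide)))
        have h2 : (String.ofList [s.getD j ' '] == "O") = false := by
          simp only [beq_eq_false_iff_ne, ne_eq]
          intro hh
          exact hO (pv_ofList_inj (hh.trans (by decide)))
        rw [h1]
        simp only [Bool.false_eq_true, if_false]
        rw [h2]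
        simp only [Bool.false_eq_true, if_false]
        rw [hset]
        have hval : PySem.Dict.getD
            (PySem.Dict.ofList [("a","4"),("e","3"),("i","!"),("o","ooo"),("O","000"),("u","|_|")])
            (String.ofList [k]) (String.ofList [k]) = pvSym (s.getD j ' ') k := by
          have hk' := hk
          simp only [pvVowels, List.mem_cons, List.not_mem_nil, or_false] at hk'
          rcases hk' with rfl | rfl | rfl | rfl | rfl
          · rw [show pvSym (s.getD j ' ') 'a' = "4" from by simp [pvSym]]; decide
          · rw [show pvSym (s.getD j ' ') 'e' = "3" from by simp [pvSym]]; decide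
          · rw [show pvSym (s.getD j ' ') 'i' = "!" from by simp [pvSym]]; decide
          · exact absurd rfl hko
          · rw [show pvSym (s.getD j ' ') 'u' = "|_|" from by simp [pvSym]]; decide
        rw [hval]
        exact pvApply_set s K k j hkK hPj

theorem pvA_eq (string : String) :
    vowel_swapper string = PySem.Str.join "" (pvApply string.toList pvVowels) := by
  rw [pvA_unfold]
  simp only [List.foldl_cons, List.foldl_nil]
  rw [pvApply_nil string.toList]
  rw [show ("a" : String) = String.ofList ['a'] from by decide,
      show ("e" : String) = String.ofList ['e'] from by decide,
      show ("i" : String) = String.ofList ['i'] from by decide,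
      show ("o" : String) = String.ofList ['o'] from by decide,
      show ("u" : String) = String.ofList ['u'] from by decide]
  rw [pvStepA_vowel string [] 'a' (by decide) (by decide)]
  simp only [List.nil_append, List.cons_append]
  rw [pvStepA_vowel string ['a'] 'e' (by decide) (by decide)]
  simp only [List.nil_append, List.cons_append]
  rw [pvStepA_vowel string ['a','e'] 'i' (by decide) (by decide)]
  simp only [List.nil_append, List.cons_append]
  rw [pvStepA_vowel string ['a','e','i'] 'o' (by decide) (by decide)]
  simp only [List.nil_append, List.cons_append]
  rw [pvStepA_O]
  rw [pvStepA_vowel string ['a','e','i','o'] 'u' (by decide) (by decide)]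
  simp only [List.nil_append, List.cons_append]
  rfl

-- ---------- B port: loop invariant ----------

theorem pv_isIn_aeiou (c : Char) :
    PySem.Str.isIn (String.ofList [c]) "aeiou" = true ↔ c ∈ pvVowels := by
  rw [show PySem.Str.isIn (String.ofList [c]) "aeiou" =
      PySem.Chars.isIn [c] ("aeiou".toList) from by
    simp [PySem.Str.isIn]]
  rw [show ("aeiou".toList) = pvVowels from by decide]
  rw [PySem.Chars.isIn_iff_infix]
  exact pv_singleton_infix c pvVowels

theorem pvUpTo_stable (s : List Char) (j : Nat)
    (hmiss : pvHit s pvVowels j = false) : pvUpTo s j = pvUpTo s (j+1) := by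
  unfold pvUpTo
  apply pv_map_range_congr
  intro i _
  unfold pvCellUp
  by_cases hij : i = j
  · subst hij
    rw [hmiss]
    simp
  · have : (decide (i < j)) = (decide (i < j + 1)) := by
      by_cases h : i < j
      · rw [decide_eq_true h, decide_eq_true (by omega)]
      · rw [decide_eq_false h, decide_eq_false (by omega)]
    rw [this]

theorem pvUpTo_set (s : List Char) (j : Nat) (hj : j < s.length)
    (hhit : pvHit s pvVowels j = true) :
    (pvUpTo s j).set j (pvSym (s.getD j ' ') ((pvLow s).getD j ' ')) = pvUpTo s (j+1) := by
  apply List.ext_getElem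
  · simp [pvUpTo]
  · intro i h1 h2
    have hi : i < s.length := by simpa [pvUpTo] using h2
    rw [List.getElem_set]
    simp only [pvUpTo, List.getElem_map, List.getElem_range]
    by_cases hij : j = i
    · subst hij
      rw [if_pos rfl]
      unfold pvCellUp
      rw [hhit]
      rw [decide_eq_true (by omega : j < j + 1)]
      simp
    · rw [if_neg hij]
      unfold pvCellUp
      have : (decide (i < j)) = (decide (i < j + 1)) := by
        by_cases h : i < j
        · rw [decide_eq_true h, decide_eq_true (by omega)]
        · rw [decide_eq_false h]
          have : ¬ (i < j + 1) := by omega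
          rw [decide_eq_false this]
      rw [this]

theorem pvUpTo_getD_orig (s : List Char) (j : Nat) (hj : j < s.length) :
    PySem.List.pyGetD (pvUpTo s j) (j : Int) "" = String.ofList [s.getD j ' '] := by
  rw [PySem.List.pyGetD_natCast]
  have hlen : j < (pvUpTo s j).length := by rw [pvUpTo_length]; exact hj
  rw [List.getD_eq_getElem _ _ hlen]
  simp only [pvUpTo, List.getElem_map, List.getElem_range]
  unfold pvCellUp
  have : decide (j < j) = false := by simp
  rw [this]
  simp

theorem pvB_loop (s : List Char) :
    ∀ (d j : Nat) (counts : PySem.Dict String Int),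
      j ≤ s.length → s.length - j = d →
      (∀ c, c ∈ pvVowels →
        PySem.Dict.getD counts (String.ofList [c]) 0 = (((pvLow s).take j).count c : Int)) →
      ((PySem.List.enumerate ((pvLow s).drop j) (j : Int)).foldl pvStepB
        (pvUpTo s j, counts)).1 = pvApply s pvVowels := by
  intro d
  induction d with
  | zero =>
      intro j counts hj hd hc
      have hjn : j = s.length := by omega
      subst hjn
      rw [show (pvLow s).drop s.length = [] from by
        rw [← pvLow_length s]; exact List.drop_length]
      rw [show PySem.List.enumerate ([] : List Char) ((s.length : Nat) : Int) = [] from by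
        simp [PySem.List.enumerate]]
      rw [List.foldl_nil]
      exact pvUpTo_full s
  | succ d ih =>
      intro j counts hj hd hc
      have hjn : j < s.length := by omega
      have hjl : j < (pvLow s).length := by rw [pvLow_length]; exact hjn
      obtain ⟨ch, hch⟩ : ∃ c, (pvLow s)[j] = c := ⟨_, rfl⟩
      have hdrop : (pvLow s).drop j = ch :: (pvLow s).drop (j+1) := by
        rw [← hch]
        exact List.drop_eq_getElem_cons hjl
      rw [hdrop]
      rw [show PySem.List.enumerate (ch :: (pvLow s).drop (j+1)) ((j : Nat) : Int) =
          (((j : Nat) : Int), ch) ::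
            PySem.List.enumerate ((pvLow s).drop (j+1)) (((j : Nat) : Int) + 1) from by
        simp [PySem.List.enumerate]]
      rw [List.foldl_cons]
      rw [show ((j : Nat) : Int) + 1 = (((j + 1 : Nat)) : Int) from by push_cast; ring]
      have hgdl : (pvLow s).getD j ' ' = ch := by
        rw [List.getD_eq_getElem _ _ hjl]; exact hch
      have hgsome : (pvLow s)[j]? = some ch := by
        rw [List.getElem?_eq_getElem hjl, hch]
      have hlowch : PySem.Chars.lowerChar (s.getD j ' ') = ch := by
        have h := pv_lower_char (s := s) hjn
        rw [hgsome] at h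
        exact (Option.some_inj.1 h.symm)
      have hcnt' : ∀ c, c ∈ pvVowels →
          ((pvLow s).take (j+1)).count c
            = ((pvLow s).take j).count c + (if ch = c then 1 else 0) := by
        intro c _
        rw [pv_count_take_succ hjl c, hch]
      -- the counter after this iteration's insert (only performed in the vowel branch)
      have hinv' : ch ∈ pvVowels → ∀ c, c ∈ pvVowels →
          PySem.Dict.getD
            (PySem.Dict.insert counts (String.ofList [ch])
              (PySem.Dict.getD counts (String.ofList [ch]) 0 + 1))
            (String.ofList [c]) 0 = (((pvLow s).take (j+1)).count c : Int) := by
        intro hv c hcv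
        rw [PySem.Dict.getD_insert]
        by_cases hcc : c = ch
        · subst hcc
          rw [if_pos rfl, hc c hcv, hcnt' c hcv, if_pos rfl]
          push_cast
          ring
        · rw [if_neg (fun h => hcc (pv_ofList_inj h)), hc c hcv, hcnt' c hcv,
            if_neg (fun h => hcc h.symm)]
          norm_num
      by_cases hv : ch ∈ pvVowels
      · have hin : PySem.Str.isIn (String.ofList [ch]) "aeiou" = true :=
          (pv_isIn_aeiou ch).2 hv
        have hcount := hc ch hv
        by_cases hcnt : ((pvLow s).take j).count ch = 1
        · -- this is the second occurrence: B rewrites position j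
          have hhit : pvHit s pvVowels j = true := by
            apply (pvHit_true_iff s pvVowels j).2
            exact ⟨ch, hgsome, hv, hgsome, hcnt⟩
          have h2 : ((PySem.Dict.getD counts (String.ofList [ch]) 0 + 1 : Int) == 2) = true := by
            rw [hcount, hcnt]
            decide
          have hstep : pvStepB (pvUpTo s j, counts) (((j : Nat) : Int), ch) =
              (pvUpTo s (j+1),
               PySem.Dict.insert counts (String.ofList [ch])
                 (PySem.Dict.getD counts (String.ofList [ch]) 0 + 1)) := by
            unfold pvStepB
            simp only [hin, if_true, h2]
            by_cases hos : ch = 'o'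
            · rw [if_pos (show (String.ofList [ch] == "o") = true from by
                rw [hos]; decide)]
              rw [pvUpTo_getD_orig s j hjn]
              rw [PySem.List.pySetD_natCast]
              have hval : (if (String.ofList [s.getD j ' '] == "o") = true
                    then "ooo" else "000") =
                  pvSym (s.getD j ' ') ((pvLow s).getD j ' ') := by
                rw [hgdl, hos]
                unfold pvSym
                rw [if_pos rfl]
                by_cases h : s.getD j ' ' = 'o'
                · rw [if_pos (show (String.ofList [s.getD j ' '] == "o") = true from by
                    rw [h]; decide), if_pos h]
                · have hfo : (String.ofList [s.getD j ' '] == "o") = false := by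
                    apply beq_eq_false_iff_ne.2
                    intro hh
                    exact h (pv_ofList_inj (hh.trans (by decide)))
                  rw [if_neg h, hfo]
                  simp
              rw [hval, pvUpTo_set s j hjn hhit]
            · have hfo : (String.ofList [ch] == "o") = false := by
                apply beq_eq_false_iff_ne.2
                intro hh
                exact hos (pv_ofList_inj (hh.trans (by decide)))
              rw [hfo]
              simp only [Bool.false_eq_true, if_false]
              rw [PySem.List.pySetD_natCast]
              have hval : PySem.Dict.getD
                  (PySem.Dict.ofList [("a","4"),("e","3"),("i","!"),("u","|_|")])
                  (String.ofList [ch]) "" = pvSym (s.getD j ' ') ((pvLow s).getD j ' ') := by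
                rw [hgdl]
                simp only [pvVowels, List.mem_cons, List.not_mem_nil, or_false] at hv
                rcases hv with rfl | rfl | rfl | rfl | rfl
                · rw [show pvSym (s.getD j ' ') 'a' = "4" from by simp [pvSym]]; decide
                · rw [show pvSym (s.getD j ' ') 'e' = "3" from by simp [pvSym]]; decide
                · rw [show pvSym (s.getD j ' ') 'i' = "!" from by simp [pvSym]]; decide
                · exact absurd rfl hos
                · rw [show pvSym (s.getD j ' ') 'u' = "|_|" from by simp [pvSym]]; decide
              rw [hval, pvUpTo_set s j hjn hhit]
          rw [hstep]
          exact ih (j+1) _ (by omega) (by omega) (hinv' hv)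
        · -- a vowel, but not its second occurrence: only the counter changes
          have hmiss : pvHit s pvVowels j = false := by
            by_contra h
            simp only [Bool.not_eq_false] at h
            rcases (pvHit_true_iff s pvVowels j).1 h with ⟨c, hg, _, _, hcc⟩
            obtain rfl : c = ch := by
              rw [hgsome] at hg
              exact (Option.some_inj.1 hg).symm
            exact hcnt hcc
          have h2 : ((PySem.Dict.getD counts (String.ofList [ch]) 0 + 1 : Int) == 2) = false := by
            rw [hcount]
            simp only [beq_eq_false_iff_ne, ne_eq]
            intro hh
            apply hcnt
            omega
          have hstep : pvStepB (pvUpTo s j, counts) (((j : Nat) : Int), ch) =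
              (pvUpTo s j,
               PySem.Dict.insert counts (String.ofList [ch])
                 (PySem.Dict.getD counts (String.ofList [ch]) 0 + 1)) := by
            unfold pvStepB
            simp only [hin, if_true, h2]
            simp
          rw [hstep, pvUpTo_stable s j hmiss]
          exact ih (j+1) _ (by omega) (by omega) (hinv' hv)
      · -- not a vowel: nothing changes
        have hin : PySem.Str.isIn (String.ofList [ch]) "aeiou" = false := by
          by_contra h
          simp only [Bool.not_eq_false] at h
          exact hv ((pv_isIn_aeiou ch).1 h)
        have hmiss : pvHit s pvVowels j = false := by
          by_contra h
          simp only [Bool.not_eq_false] at h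
          rcases (pvHit_true_iff s pvVowels j).1 h with ⟨c, hg, hmem, _⟩
          obtain rfl : c = ch := by
            rw [hgsome] at hg
            exact (Option.some_inj.1 hg).symm
          exact hv hmem
        have hstep : pvStepB (pvUpTo s j, counts) (((j : Nat) : Int), ch) =
            (pvUpTo s j, counts) := by
          unfold pvStepB
          simp only [hin]
          simp
        have hinv'' : ∀ c, c ∈ pvVowels →
            PySem.Dict.getD counts (String.ofList [c]) 0 =
              (((pvLow s).take (j+1)).count c : Int) := by
          intro c hcv
          rw [hc c hcv, hcnt' c hcv, if_neg (fun h => hv (by rw [h]; exact hcv))]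
          norm_num
        rw [hstep, pvUpTo_stable s j hmiss]
        exact ih (j+1) _ (by omega) (by omega) hinv''

theorem pvB_eq (string : String) :
    vowel_swapper_alt string = PySem.Str.join "" (pvApply string.toList pvVowels) := by
  have hunfold : vowel_swapper_alt string =
      PySem.Str.join ""
        ((PySem.List.enumerate ((PySem.Str.lower string).toList) 0).foldl pvStepB
          (string.toList.map (fun c => String.ofList [c]), PySem.Dict.empty)).1 := rfl
  rw [hunfold]
  rw [show (PySem.Str.lower string).toList = pvLow string.toList from
    PySem.Str.toList_lower string]
  rw [show (pvLow string.toList) = (pvLow string.toList).drop 0 from rfl]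
  rw [show (0 : Int) = ((0 : Nat) : Int) from rfl]
  rw [pv_init_upto string.toList]
  rw [pvB_loop string.toList string.toList.length 0 PySem.Dict.empty
    (by omega) (by omega)
    (by
      intro c _
      rw [PySem.Dict.getD_empty]
      simp)]

-- ===== VERDICT (by name: the statement is the Claim_ definition above) =====
theorem vowel_swapper_spec : Claim_equal_vowel_swapper := by
  intro string _
  unfold Spec_vowel_swapper
  rw [pvA_eq, pvB_eq]
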